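-- pv_equiv track=rewrite | github.com/averykom/personal-dashboard-tui | src/dashboard_tui/widgets/school.py | _unfold_lines
-- ===== SOURCE A (Python) =====
-- def _unfold_lines(raw: str) -> list[str]:
--     normalized = raw.replace("\r\n", "\n").replace("\r", "\n")
--     source_lines = normalized.split("\n")
--     out: list[str] = []
--     for line in source_lines:
--         if not line:
--             continue
--         if line.startswith((" ", "\t")) and out:
--             out[-1] += line[1:]
--         else:
--             out.append(line)
--     return out
-- ===== SOURCE B (Python) =====
-- def _unfold_lines(raw: str) -> list[str]:
--     # Work on the whole text at once: drop blank lines, then delete each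
--     # newline-plus-one-whitespace fold marker globally, and split back.
--     lines = [ln for ln in raw.replace("\r\n", "\n").replace("\r", "\n").split("\n") if ln]
--     if not lines:
--         return []
--     text = "\n".join(lines)
--     text = text.replace("\n\t", "\n ").replace("\n ", "")
--     return text.split("\n")
-- ===== Notes on version B (the rewrite author's own statement) =====
-- stated objective: alternative
-- what changed: Instead of A's per-line fold that appends or mutates the last output record, B drops blank lines, joins the remainder into one text and unfolds all continuations at once with global string replaces (tab continuations canonicalised to space, then each newline+space marker deleted) before splitting back into lines.
import Mathlib
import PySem

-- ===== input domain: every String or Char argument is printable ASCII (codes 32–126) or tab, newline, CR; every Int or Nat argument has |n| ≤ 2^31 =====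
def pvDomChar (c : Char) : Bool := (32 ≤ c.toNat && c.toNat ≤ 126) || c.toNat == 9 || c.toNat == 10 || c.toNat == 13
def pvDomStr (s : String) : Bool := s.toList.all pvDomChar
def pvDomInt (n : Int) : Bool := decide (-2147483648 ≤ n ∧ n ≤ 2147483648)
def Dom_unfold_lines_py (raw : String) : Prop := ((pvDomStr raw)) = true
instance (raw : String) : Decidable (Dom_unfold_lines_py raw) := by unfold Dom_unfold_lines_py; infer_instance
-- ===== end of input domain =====

-- B drops blank lines, then works on the joined text at once: it canonicalises tab continuations
-- and deletes every newline+whitespace fold marker with global string replaces before splitting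
-- back, instead of A's per-line fold that mutates out[-1]; objective: alternative.

-- ===== PORT A =====
-- loop body of A: skip empty lines; merge a continuation line into out[-1]; else append
def pvStepA (out : List String) (line : String) : List String :=
  if line = "" then out
  else if (PySem.Str.startswith line " " || PySem.Str.startswith line "\t") && !out.isEmpty then
    out.dropLast ++ [out.getLastD "" ++ PySem.Str.slice line (some 1) none]
  else out ++ [line]

def unfold_lines_py (raw : String) : List String :=
  let normalized := PySem.Str.replace (PySem.Str.replace raw "\r\n" "\n") "\r" "\n"
  -- normalized.split("\n"): sep is the non-empty literal "\n", so split? is some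
  let source_lines := (PySem.Str.split? normalized "\n").getD []
  source_lines.foldl pvStepA []

-- ===== PORT B =====
def unfold_lines_py_alt (raw : String) : List String :=
  let lines := ((PySem.Str.split? (PySem.Str.replace (PySem.Str.replace raw "\r\n" "\n") "\r" "\n") "\n").getD []).filter (· ≠ "")
  if lines = [] then []
  else
    let text := PySem.Str.join "\n" lines
    let text := PySem.Str.replace (PySem.Str.replace text "\n\t" "\n ") "\n " ""
    (PySem.Str.split? text "\n").getD []

-- ===== PRECONDITION & SPEC =====
def Spec_unfold_lines_py (raw : String) (out : List String) : Prop := out = unfold_lines_py_alt raw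
instance (raw : String) (out : List String) : Decidable (Spec_unfold_lines_py raw out) := by unfold Spec_unfold_lines_py; infer_instance

-- ===== CLAIM =====
def Claim_equal_unfold_lines_py : Prop := ∀ (raw : String), Dom_unfold_lines_py raw → Spec_unfold_lines_py raw (unfold_lines_py raw)

-- ===== LEMMAS AND PROOFS =====

def pvRep (a b : Char) (r : List Char) : List Char → List Char
  | [] => []
  | [c] => [c]
  | c :: d :: t => if c = a ∧ d = b then r ++ pvRep a b r t else c :: pvRep a b r (d :: t)

theorem pvRep_go (a b : Char) (r : List Char) : ∀ (fuel : Nat) (l acc : List Char),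
    l.length ≤ fuel → PySem.Chars.replace.go [a, b] r fuel l acc = acc.reverse ++ pvRep a b r l := by
  intro fuel
  induction fuel with
  | zero =>
    intro l acc h
    have : l = [] := by cases l <;> simp_all
    subst this
    unfold PySem.Chars.replace.go
    simp [pvRep]
  | succ n ih =>
    intro l acc h
    match l with
    | [] => unfold PySem.Chars.replace.go; simp [pvRep]
    | [c] =>
      unfold PySem.Chars.replace.go
      have hpre : ([a, b].isPrefixOf [c]) = false := by
        simp [List.isPrefixOf]
      rw [hpre]
      simp only [Bool.false_eq_true, if_false]
      -- now go n [] (c :: acc)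
      rw [ih [] (c :: acc) (by simp)]
      simp [pvRep]
    | c :: d :: t =>
      unfold PySem.Chars.replace.go
      by_cases hcd : c = a ∧ d = b
      · obtain ⟨rfl, rfl⟩ := hcd
        have hpre : ([c, d].isPrefixOf (c :: d :: t)) = true := by
          simp [List.isPrefixOf]
        rw [hpre]
        simp only [if_true]
        rw [ih _ _ (by simp at h ⊢; omega)]
        simp [pvRep]
      · have hpre : ([a, b].isPrefixOf (c :: d :: t)) = false := by
          simp [List.isPrefixOf]
          intro ha hb; exact hcd ⟨ha.symm, hb.symm⟩
        rw [hpre]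
        simp only [Bool.false_eq_true, if_false]
        rw [ih _ _ (by simp at h ⊢; omega)]
        simp [pvRep, hcd]

theorem pvReplace_eq (a b : Char) (r l : List Char) :
    PySem.Chars.replace l [a, b] r = pvRep a b r l := by
  unfold PySem.Chars.replace
  simp only [List.isEmpty_cons, if_false, Bool.false_eq_true]
  rw [pvRep_go a b r l.length l [] le_rfl]
  simp

def pvSplit : List Char → List Char → List (List Char)
  | cur, [] => [cur]
  | cur, c :: t => if c = '\n' then cur :: pvSplit [] t else pvSplit (cur ++ [c]) t

theorem pvSplit_go : ∀ (fuel : Nat) (s cur : List Char) (acc : List (List Char)),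
    s.length < fuel → PySem.Chars.splitOn.go ['\n'] fuel s cur acc = acc.reverse ++ pvSplit cur.reverse s := by
  intro fuel
  induction fuel with
  | zero => intro s cur acc h; omega
  | succ n ih =>
    intro s cur acc h
    match s with
    | [] => unfold PySem.Chars.splitOn.go; simp [pvSplit]
    | c :: t =>
      unfold PySem.Chars.splitOn.go
      by_cases hc : c = '\n'
      · subst hc
        have hpre : (['\n'].isPrefixOf ('\n' :: t)) = true := by simp [List.isPrefixOf]
        rw [hpre]
        simp only [if_true]
        rw [ih _ _ _ (by simp at h ⊢; omega)]
        simp [pvSplit]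
      · have hpre : (['\n'].isPrefixOf (c :: t)) = false := by
          simp [List.isPrefixOf]
          exact fun hh => hc hh.symm
        rw [hpre]
        simp only [Bool.false_eq_true, if_false]
        rw [ih _ _ _ (by simp at h ⊢; omega)]
        simp [pvSplit, hc]

theorem pvSplitOn_eq (s : List Char) : PySem.Chars.splitOn s ['\n'] = pvSplit [] s := by
  unfold PySem.Chars.splitOn
  rw [pvSplit_go (s.length + 1) s [] [] (by omega)]
  simp

def pvJoin : List (List Char) → List Char
  | [] => []
  | [x] => x
  | x :: y :: ls => x ++ '\n' :: pvJoin (y :: ls)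

theorem pvJoin_eq (L : List (List Char)) : PySem.Chars.join ['\n'] L = pvJoin L := by
  unfold PySem.Chars.join
  induction L with
  | nil => simp [pvJoin, List.intercalate]
  | cons x L ih =>
    cases L with
    | nil => simp [pvJoin, List.intercalate, List.intersperse]
    | cons y L' =>
      have h2 : List.intercalate ['\n'] (x :: y :: L') = x ++ ['\n'] ++ List.intercalate ['\n'] (y :: L') := by
        simp [List.intercalate, List.intersperse]
      rw [h2, ih]
      simp [pvJoin]

def pvMg (p : List Char → Bool) : List Char → List (List Char) → List (List Char)
  | cur, [] => [cur]
  | cur, m :: rest => if p m then pvMg p (cur ++ m.tail) rest else cur :: pvMg p m rest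

def pvPA (m : List Char) : Bool := PySem.Chars.startswith m [' '] || PySem.Chars.startswith m ['\t']
def pvPS (m : List Char) : Bool := m.head? == some ' '
def pvCanon (m : List Char) : List Char := if m.head? = some '\t' then ' ' :: m.tail else m

theorem pvRep_append (a b : Char) (r : List Char) : ∀ (l : List Char), a ∉ l →
    ∀ s, pvRep a b r (l ++ s) = l ++ pvRep a b r s := by
  intro l
  induction l with
  | nil => intro _ s; simp
  | cons c l' ih =>
    intro hl s
    have hc : a ≠ c := by simp at hl; exact hl.1
    have hl' : a ∉ l' := by simp at hl; exact fun h => hl.2 h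
    match hls : l' ++ s with
    | [] =>
      have : l' = [] ∧ s = [] := by constructor <;> [skip; skip] <;> cases l' <;> simp_all
      obtain ⟨rfl, rfl⟩ := this
      simp [pvRep]
    | d :: t =>
      have : (c :: l') ++ s = c :: d :: t := by simp [hls]
      rw [this]
      show pvRep a b r (c :: d :: t) = _
      rw [pvRep]
      rw [if_neg (by intro hh; exact hc hh.1.symm)]
      rw [← hls, ih hl' s]
      simp

theorem pvSplit_append : ∀ (l : List Char), '\n' ∉ l →
    ∀ cur s, pvSplit cur (l ++ s) = pvSplit (cur ++ l) s := by
  intro l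
  induction l with
  | nil => intro _ cur s; simp
  | cons c l' ih =>
    intro hl cur s
    simp at hl
    show pvSplit cur (c :: (l' ++ s)) = _
    rw [pvSplit, if_neg (fun h => hl.1 h.symm), ih (fun h => hl.2 h) (cur ++ [c]) s]
    simp

theorem pvJoin_cons_head (c : Char) (mt : List Char) (ls : List (List Char)) :
    pvJoin ((c :: mt) :: ls) = c :: pvJoin (mt :: ls) := by
  cases ls with
  | nil => simp [pvJoin]
  | cons y L => simp [pvJoin]

theorem pvMg_ne_nil (p : List Char → Bool) : ∀ (ls : List (List Char)) (cur : List Char),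
    pvMg p cur ls ≠ [] := by
  intro ls
  induction ls with
  | nil => intro cur; simp [pvMg]
  | cons m rest ih =>
    intro cur
    rw [pvMg]
    split
    · exact ih _
    · simp

theorem pvMg_prepend (p : List Char → Bool) : ∀ (ls : List (List Char)) (x cur : List Char),
    pvMg p (x ++ cur) ls = (pvMg p cur ls).modifyHead (x ++ ·) := by
  intro ls
  induction ls with
  | nil => intro x cur; simp [pvMg]
  | cons m rest ih =>
    intro x cur
    rw [pvMg, pvMg]
    split
    · rw [List.append_assoc] at *
      rw [ih x (cur ++ m.tail)]
    · simp

theorem pvJoin_modifyHead (x : List Char) (L : List (List Char)) (hL : L ≠ []) :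
    pvJoin (L.modifyHead (x ++ ·)) = x ++ pvJoin L := by
  match L with
  | [] => exact absurd rfl hL
  | l :: ls =>
    cases ls with
    | nil => simp [pvJoin]
    | cons y L' => simp [pvJoin]

theorem pvMg_nlfree (p : List Char → Bool) : ∀ (ls : List (List Char)) (cur : List Char),
    '\n' ∉ cur → (∀ m ∈ ls, '\n' ∉ m) → ∀ rec ∈ pvMg p cur ls, '\n' ∉ rec := by
  intro ls
  induction ls with
  | nil => intro cur hc _ rec hrec; simp [pvMg] at hrec; subst hrec; exact hc
  | cons m rest ih =>
    intro cur hc hls rec hrec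
    rw [pvMg] at hrec
    have hm : '\n' ∉ m := hls m (by simp)
    have hrest : ∀ m' ∈ rest, '\n' ∉ m' := fun m' h => hls m' (by simp [h])
    split at hrec
    · exact ih _ (by
        intro h
        rcases List.mem_append.mp h with h | h
        · exact hc h
        · exact hm (List.mem_of_mem_tail h)) hrest rec hrec
    · rcases List.mem_cons.mp hrec with rfl | h
      · exact hc
      · exact ih _ hm hrest rec h

theorem pvSplit_nlfree : ∀ (s cur : List Char), '\n' ∉ cur → ∀ piece ∈ pvSplit cur s, '\n' ∉ piece := by
  intro s
  induction s with
  | nil => intro cur hc piece hp; simp [pvSplit] at hp; subst hp; exact hc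
  | cons c t ih =>
    intro cur hc piece hp
    rw [pvSplit] at hp
    split at hp
    · rcases List.mem_cons.mp hp with rfl | h
      · exact hc
      · exact ih [] (by simp) piece h
    · rename_i hcnl
      exact ih (cur ++ [c]) (by
        intro h
        rcases List.mem_append.mp h with h | h
        · exact hc h
        · simp at h; exact hcnl h.symm) piece hp

theorem pvMg_canon : ∀ (ls : List (List Char)) (cur : List Char),
    pvMg pvPS cur (ls.map pvCanon) = pvMg pvPA cur ls := by
  intro ls
  induction ls with
  | nil => intro cur; simp [pvMg]
  | cons m rest ih =>
    intro cur
    simp only [List.map_cons]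
    rw [pvMg, pvMg]
    match m with
    | [] =>
      have h1 : pvPS (pvCanon []) = false := by decide
      have h2 : pvPA [] = false := by decide
      rw [h1, h2]
      simp only [Bool.false_eq_true, if_false]
      show cur :: pvMg pvPS (pvCanon []) (rest.map pvCanon) = cur :: pvMg pvPA [] rest
      have : pvCanon [] = [] := by decide
      rw [this, ih]
    | c :: mt =>
      by_cases hsp : c = ' ' ∨ c = '\t'
      · have h1 : pvPS (pvCanon (c :: mt)) = true := by
          rcases hsp with rfl | rfl <;> simp [pvCanon, pvPS]
        have h2 : pvPA (c :: mt) = true := by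
          rcases hsp with rfl | rfl <;> simp [pvPA, PySem.Chars.startswith, List.isPrefixOf]
        rw [h1, h2]
        simp only [if_true]
        have h3 : (pvCanon (c :: mt)).tail = mt := by
          rcases hsp with rfl | rfl <;> simp [pvCanon]
        rw [h3, ih]
        simp
      · simp only [not_or] at hsp
        have h4 : pvCanon (c :: mt) = c :: mt := by
          simp [pvCanon]
          intro h; exact absurd h hsp.2
        rw [h4]
        have h1 : pvPS (c :: mt) = false := by
          simp [pvPS]
          intro h; exact absurd h hsp.1
        have h2 : pvPA (c :: mt) = false := by
          simp [pvPA, PySem.Chars.startswith, List.isPrefixOf]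
          exact ⟨fun h => absurd h.symm hsp.1, fun h => absurd h.symm hsp.2⟩
        rw [h1, h2]
        simp only [Bool.false_eq_true, if_false]
        rw [ih]

theorem pvRep_nlfree (a b : Char) (r l : List Char) (h : a ∉ l) : pvRep a b r l = l := by
  have := pvRep_append a b r l h []
  simpa [pvRep] using this

theorem pvK1 : ∀ (ls : List (List Char)) (l : List Char), '\n' ∉ l →
    (∀ m ∈ ls, '\n' ∉ m ∧ m ≠ []) →
    pvRep '\n' '\t' ['\n', ' '] (pvJoin (l :: ls)) = pvJoin (l :: ls.map pvCanon) := by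
  intro ls
  induction ls with
  | nil => intro l hl _; simp [pvJoin, pvRep_nlfree _ _ _ _ hl]
  | cons m rest ih =>
    intro l hl hls
    obtain ⟨hmfree, hmne⟩ := hls m (by simp)
    have hrest : ∀ m' ∈ rest, '\n' ∉ m' ∧ m' ≠ [] := fun m' h => hls m' (by simp [h])
    match m, hmne with
    | c :: mt, _ =>
      have hcne : c ≠ '\n' := by simp at hmfree; exact fun h => hmfree.1 h.symm
      have hmtfree : '\n' ∉ mt := by simp at hmfree; exact fun h => hmfree.2 h
      show pvRep '\n' '\t' ['\n', ' '] (pvJoin (l :: (c :: mt) :: rest)) = _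
      rw [show pvJoin (l :: (c :: mt) :: rest) = l ++ '\n' :: pvJoin ((c :: mt) :: rest) from rfl]
      rw [pvRep_append _ _ _ _ hl, pvJoin_cons_head]
      by_cases hc : c = '\t'
      · subst hc
        rw [show pvRep '\n' '\t' ['\n', ' '] ('\n' :: '\t' :: pvJoin (mt :: rest))
              = ['\n', ' '] ++ pvRep '\n' '\t' ['\n', ' '] (pvJoin (mt :: rest)) from by
            rw [pvRep]; simp]
        rw [ih mt hmtfree hrest]
        have hcanon : pvCanon ('\t' :: mt) = ' ' :: mt := by simp [pvCanon]
        simp only [List.map_cons, hcanon]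
        rw [show pvJoin (l :: (' ' :: mt) :: rest.map pvCanon)
              = l ++ '\n' :: pvJoin ((' ' :: mt) :: rest.map pvCanon) from rfl]
        rw [pvJoin_cons_head]
        simp
      · rw [show pvRep '\n' '\t' ['\n', ' '] ('\n' :: c :: pvJoin (mt :: rest))
              = '\n' :: pvRep '\n' '\t' ['\n', ' '] (c :: pvJoin (mt :: rest)) from by
            rw [pvRep]; simp [hc]]
        rw [← pvJoin_cons_head, ih (c :: mt) hmfree hrest]
        have hcanon : pvCanon (c :: mt) = c :: mt := by simp [pvCanon]; intro h; exact absurd h hc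
        simp only [List.map_cons, hcanon]
        rfl

theorem pvK2 : ∀ (ls : List (List Char)) (l : List Char), '\n' ∉ l →
    (∀ m ∈ ls, '\n' ∉ m ∧ m ≠ []) →
    pvRep '\n' ' ' [] (pvJoin (l :: ls)) = pvJoin (pvMg pvPS l ls) := by
  intro ls
  induction ls with
  | nil => intro l hl _; simp [pvJoin, pvMg, pvRep_nlfree _ _ _ _ hl]
  | cons m rest ih =>
    intro l hl hls
    obtain ⟨hmfree, hmne⟩ := hls m (by simp)
    have hrest : ∀ m' ∈ rest, '\n' ∉ m' ∧ m' ≠ [] := fun m' h => hls m' (by simp [h])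
    match m, hmne with
    | c :: mt, _ =>
      have hcne : c ≠ '\n' := by simp at hmfree; exact fun h => hmfree.1 h.symm
      have hmtfree : '\n' ∉ mt := by simp at hmfree; exact fun h => hmfree.2 h
      show pvRep '\n' ' ' [] (pvJoin (l :: (c :: mt) :: rest)) = pvJoin (pvMg pvPS l ((c :: mt) :: rest))
      rw [show pvJoin (l :: (c :: mt) :: rest) = l ++ '\n' :: pvJoin ((c :: mt) :: rest) from rfl]
      rw [pvRep_append _ _ _ _ hl, pvJoin_cons_head]
      by_cases hc : c = ' '
      · subst hc
        rw [show pvRep '\n' ' ' [] ('\n' :: ' ' :: pvJoin (mt :: rest))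
              = pvRep '\n' ' ' [] (pvJoin (mt :: rest)) from by rw [pvRep]; simp]
        rw [ih mt hmtfree hrest]
        rw [show pvMg pvPS l ((' ' :: mt) :: rest) = pvMg pvPS (l ++ mt) rest from by
          rw [pvMg]; simp [pvPS]]
        rw [pvMg_prepend, pvJoin_modifyHead _ _ (pvMg_ne_nil _ _ _)]
      · rw [show pvRep '\n' ' ' [] ('\n' :: c :: pvJoin (mt :: rest))
              = '\n' :: pvRep '\n' ' ' [] (c :: pvJoin (mt :: rest)) from by
            rw [pvRep]; simp [hc]]
        rw [← pvJoin_cons_head, ih (c :: mt) hmfree hrest]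
        rw [show pvMg pvPS l ((c :: mt) :: rest) = l :: pvMg pvPS (c :: mt) rest from by
          rw [pvMg]
          have : pvPS (c :: mt) = false := by simp [pvPS]; intro h; exact absurd h hc
          rw [this]
          simp]
        obtain ⟨r0, rs, hshape⟩ : ∃ r0 rs, pvMg pvPS (c :: mt) rest = r0 :: rs := by
          cases hx : pvMg pvPS (c :: mt) rest with
          | nil => exact absurd hx (pvMg_ne_nil _ _ _)
          | cons r0 rs => exact ⟨r0, rs, rfl⟩
        rw [hshape]
        rfl

theorem pvSplit_join : ∀ (ls : List (List Char)) (l cur : List Char), '\n' ∉ l →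
    (∀ m ∈ ls, '\n' ∉ m) →
    pvSplit cur (pvJoin (l :: ls)) = (cur ++ l) :: ls := by
  intro ls
  induction ls with
  | nil =>
    intro l cur hl _
    have := pvSplit_append l hl cur []
    simpa [pvSplit, pvJoin] using this
  | cons m rest ih =>
    intro l cur hl hls
    rw [show pvJoin (l :: m :: rest) = l ++ '\n' :: pvJoin (m :: rest) from rfl]
    rw [pvSplit_append l hl]
    rw [show pvSplit (cur ++ l) ('\n' :: pvJoin (m :: rest))
          = (cur ++ l) :: pvSplit [] (pvJoin (m :: rest)) from by rw [pvSplit]; simp]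
    rw [ih m [] (hls m (by simp)) (fun m' h => hls m' (by simp [h]))]
    simp

def pvStepA' (out : List String) (line : String) : List String :=
  if (PySem.Str.startswith line " " || PySem.Str.startswith line "\t") && !out.isEmpty then
    out.dropLast ++ [out.getLastD "" ++ PySem.Str.slice line (some 1) none]
  else out ++ [line]

theorem pv_foldA_filter (ls : List String) : ∀ (out : List String),
    ls.foldl pvStepA out = (ls.filter (· ≠ "")).foldl pvStepA' out := by
  induction ls with
  | nil => intro out; rfl
  | cons ln ls ih =>
    intro out
    by_cases h : ln = ""
    · subst h; simpa [pvStepA, List.filter] using ih out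
    · simp only [List.foldl, List.filter, h, ne_eq, not_false_iff, decide_true]
      rw [ih]
      congr 1
      simp [pvStepA, pvStepA', h]

theorem pvCond_eq (m : List Char) :
    (PySem.Str.startswith (String.ofList m) " " || PySem.Str.startswith (String.ofList m) "\t") = pvPA m := by
  rw [pvPA, PySem.Str.startswith_eq, PySem.Str.startswith_eq, String.toList_ofList]
  rfl

theorem pvSlice_tail (cur m : List Char) :
    String.ofList cur ++ PySem.Str.slice (String.ofList m) (some 1) none = String.ofList (cur ++ m.tail) := by
  apply String.toList_inj.mp
  rw [String.toList_append, PySem.Str.toList_slice, String.toList_ofList, String.toList_ofList]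
  simp [PySem.Chars.slice_eq_listSlice]
  rw [PySem.List.slice_from _ (by norm_num)]
  simp

theorem pvFoldA'_mg : ∀ (ls : List (List Char)) (out : List String) (cur : List Char),
    List.foldl pvStepA' (out ++ [String.ofList cur]) (ls.map String.ofList)
      = out ++ (pvMg pvPA cur ls).map String.ofList := by
  intro ls
  induction ls with
  | nil => intro out cur; simp [pvMg]
  | cons m rest ih =>
    intro out cur
    simp only [List.map_cons, List.foldl_cons]
    rw [show pvStepA' (out ++ [String.ofList cur]) (String.ofList m)
          = if pvPA m then out ++ [String.ofList (cur ++ m.tail)]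
            else (out ++ [String.ofList cur]) ++ [String.ofList m] from by
      rw [pvStepA', pvCond_eq]
      cases hpa : pvPA m
      · simp
      · simp only [Bool.true_and]
        rw [if_pos (by simp)]
        rw [List.dropLast_concat, List.getLastD_concat, pvSlice_tail]
        simp]
    cases hpa : pvPA m
    · simp only [Bool.false_eq_true, if_false]
      rw [ih (out ++ [String.ofList cur]) m]
      rw [pvMg]
      rw [hpa]
      simp
    · simp only [if_true]
      rw [ih out (cur ++ m.tail)]
      rw [pvMg, hpa]
      simp

theorem pvFilter_map (L : List (List Char)) :
    (L.map String.ofList).filter (· ≠ "") = (L.filter (· ≠ [])).map String.ofList := by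
  rw [List.filter_map]
  congr 1
  apply List.filter_congr
  intro x _
  simp [Function.comp, ← String.toList_inj]

theorem pvSplitStr (s : String) :
    (PySem.Str.split? s "\n").getD [] = (pvSplit [] s.toList).map String.ofList := by
  rw [show PySem.Str.split? s "\n"
        = Option.map (List.map String.ofList) (PySem.Chars.split? s.toList "\n".toList) from rfl]
  rw [show ("\n" : String).toList = ['\n'] from rfl]
  rw [show PySem.Chars.split? s.toList ['\n'] = some (PySem.Chars.splitOn s.toList ['\n']) from by
    simp [PySem.Chars.split?]]
  rw [pvSplitOn_eq]
  rfl

theorem pvCanon_good (m : List Char) (h1 : '\n' ∉ m) (h2 : m ≠ []) :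
    '\n' ∉ pvCanon m ∧ pvCanon m ≠ [] := by
  rw [pvCanon]
  split
  · constructor
    · intro h
      rcases List.mem_cons.mp h with h | h
      · exact absurd h.symm (by decide)
      · exact h1 (List.mem_of_mem_tail h)
    · simp
  · exact ⟨h1, h2⟩

set_option maxHeartbeats 1000000 in
theorem pv_main (raw : String) : unfold_lines_py raw = unfold_lines_py_alt raw := by
  unfold unfold_lines_py unfold_lines_py_alt
  simp only []
  set s := PySem.Str.replace (PySem.Str.replace raw "\r\n" "\n") "\r" "\n" with hs
  rw [pvSplitStr, pv_foldA_filter, pvFilter_map]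
  have hfree : ∀ p ∈ pvSplit [] s.toList, '\n' ∉ p := pvSplit_nlfree _ [] (by simp)
  set cps := (pvSplit [] s.toList).filter (· ≠ []) with hcps
  have hgood : ∀ m ∈ cps, '\n' ∉ m ∧ m ≠ [] := by
    intro m hm
    rw [hcps, List.mem_filter] at hm
    exact ⟨hfree m hm.1, by simpa using hm.2⟩
  cases hshape : cps with
  | nil => simp
  | cons c0 rest =>
    have hne : (c0 :: rest).map String.ofList ≠ [] := by simp
    rw [if_neg hne]
    -- A side
    have hstep0 : pvStepA' [] (String.ofList c0) = [] ++ [String.ofList c0] := by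
      rw [pvStepA']
      simp
    rw [List.map_cons, List.foldl_cons, hstep0, pvFoldA'_mg rest [] c0]
    -- B side
    have hc0 : '\n' ∉ c0 ∧ c0 ≠ [] := hgood c0 (by rw [hshape]; simp)
    have hrest : ∀ m ∈ rest, '\n' ∉ m ∧ m ≠ [] := fun m hm => hgood m (by rw [hshape]; simp [hm])
    have hjoin : (PySem.Str.join "\n" (String.ofList c0 :: rest.map String.ofList)).toList = pvJoin (c0 :: rest) := by
      rw [PySem.Str.toList_join]
      have hmm : List.map String.toList (String.ofList c0 :: List.map String.ofList rest) = c0 :: rest := by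
        simp only [List.map_cons, List.map_map, String.toList_ofList]
        rw [List.map_congr_left (fun x _ => by simp : ∀ x ∈ rest, (String.toList ∘ String.ofList) x = id x)]
        simp
      rw [hmm, show ("\n" : String).toList = ['\n'] from rfl, pvJoin_eq]
    have hrep1 : (PySem.Str.replace (PySem.Str.join "\n" (String.ofList c0 :: rest.map String.ofList)) "\n\t" "\n ").toList
        = pvJoin (c0 :: rest.map pvCanon) := by
      rw [PySem.Str.toList_replace, hjoin]
      rw [show ("\n\t" : String).toList = ['\n', '\t'] from rfl]
      rw [show ("\n " : String).toList = ['\n', ' '] from rfl]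
      rw [pvReplace_eq]
      exact pvK1 rest c0 hc0.1 hrest
    have hcrest : ∀ m ∈ rest.map pvCanon, '\n' ∉ m ∧ m ≠ [] := by
      intro m hm
      rcases List.mem_map.mp hm with ⟨m', hm', rfl⟩
      exact pvCanon_good m' (hrest m' hm').1 (hrest m' hm').2
    have hrep2 : (PySem.Str.replace (PySem.Str.replace (PySem.Str.join "\n" (String.ofList c0 :: rest.map String.ofList)) "\n\t" "\n ") "\n " "").toList
        = pvJoin (pvMg pvPS c0 (rest.map pvCanon)) := by
      rw [PySem.Str.toList_replace, hrep1]
      rw [show ("\n " : String).toList = ['\n', ' '] from rfl]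
      rw [show ("" : String).toList = [] from rfl]
      rw [pvReplace_eq]
      exact pvK2 (rest.map pvCanon) c0 hc0.1 hcrest
    rw [pvSplitStr, hrep2]
    obtain ⟨r0, rs, hmg⟩ : ∃ r0 rs, pvMg pvPS c0 (rest.map pvCanon) = r0 :: rs := by
      cases hx : pvMg pvPS c0 (rest.map pvCanon) with
      | nil => exact absurd hx (pvMg_ne_nil _ _ _)
      | cons r0 rs => exact ⟨r0, rs, rfl⟩
    have hrecfree : ∀ r ∈ pvMg pvPS c0 (rest.map pvCanon), '\n' ∉ r :=
      pvMg_nlfree _ _ _ hc0.1 (fun m hm => (hcrest m hm).1)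
    rw [hmg, pvSplit_join rs r0 []
      (hrecfree r0 (by rw [hmg]; simp))
      (fun m hm => hrecfree m (by rw [hmg]; simp [hm]))]
    simp only [List.nil_append]
    rw [← hmg, pvMg_canon]


-- ===== VERDICT =====
theorem unfold_lines_py_spec : Claim_equal_unfold_lines_py := by
  intro raw _
  unfold Spec_unfold_lines_py
  exact pv_main raw
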